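-- pv_equiv track=rewrite | github.com/AbramovaP/6_lab | Lab/5laba.py | generate_passwords_algorithmic
-- ===== SOURCE A (Python) =====
-- import string
--
-- letters = list(string.ascii_letters)
--
-- digits = list(string.digits)
--
-- letters_and_digits = letters + digits
--
-- def generate_passwords_algorithmic(K, T):
--     result = []
--     def backtrack(path, used, pos):
--         if len(path) == K:
--             if any(c in digits for c in path):
--                 result.append("".join(path))
--             return
--         candidates = letters if pos < T else letters_and_digits
--         for ch in candidates:
--             if ch not in used:
--                 path.append(ch)
--                 used.add(ch)
--                 backtrack(path, used, pos + 1)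
--                 path.pop()
--                 used.remove(ch)
--
--     backtrack([], set(), 0)
--     return result
-- ===== SOURCE B (Python) =====
-- import string
--
-- letters = list(string.ascii_letters)
-- digits = list(string.digits)
-- letters_and_digits = letters + digits
--
-- def generate_passwords_algorithmic(K, T):
--     # Iterative DFS with an explicit stack of (path, used, pos) frames;
--     # children are pushed in reversed candidate order so they pop in
--     # the recursion's forward (lexicographic-by-candidate-list) order.
--     result = []
--     stack = [("", frozenset(), 0)]
--     while stack:
--         path, used, pos = stack.pop()
--         if len(path) == K:
--             if any(c in digits for c in path):
--                 result.append(path)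
--             continue
--         candidates = letters if pos < T else letters_and_digits
--         for ch in reversed(candidates):
--             if ch not in used:
--                 stack.append((path + ch, used | {ch}, pos + 1))
--     return result
-- ===== Notes on version B (the rewrite author's own statement) =====
-- stated objective: alternative
-- what changed: The nested recursive backtracking with in-place path/used mutation is replaced by an iterative depth-first search over an explicit stack of immutable (path, used, pos) frames, pushing children in reversed candidate order so they pop in the recursion's order.
import Mathlib
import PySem

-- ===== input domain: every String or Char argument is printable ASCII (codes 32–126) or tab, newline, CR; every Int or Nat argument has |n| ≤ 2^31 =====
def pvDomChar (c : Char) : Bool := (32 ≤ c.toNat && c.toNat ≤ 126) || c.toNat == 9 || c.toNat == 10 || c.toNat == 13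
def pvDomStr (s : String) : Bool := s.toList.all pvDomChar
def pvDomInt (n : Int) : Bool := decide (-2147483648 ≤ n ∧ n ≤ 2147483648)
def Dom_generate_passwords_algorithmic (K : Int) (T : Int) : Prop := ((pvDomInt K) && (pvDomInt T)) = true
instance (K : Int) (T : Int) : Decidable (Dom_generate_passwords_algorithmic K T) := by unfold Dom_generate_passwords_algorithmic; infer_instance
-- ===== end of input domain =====

-- B replaces A's recursive backtracking by an iterative DFS over an explicit stack of
-- (path, used, pos) frames (children pushed in reversed candidate order); same output, similar cost.

-- ===== PORT A =====
def pvLetters : List Char := "abcdefghijklmnopqrstuvwxyzABCDEFGHIJKLMNOPQRSTUVWXYZ".toList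
def pvDigits : List Char := "0123456789".toList
def pvLettersAndDigits : List Char := pvLetters ++ pvDigits

def pvCandidates (T pos : Int) : List Char :=
  if pos < T then pvLetters else pvLettersAndDigits

-- the Nat fuel (63 at the top call) only makes the recursion total: the Python recursion's
-- depth is bounded by 63 because `used` holds distinct chars out of 62 and grows each level
def pvBtA (K T : Int) : Nat → List Char → PySem.Set Char → Int → List String → List String
  | 0, _, _, _, acc => acc
  | n + 1, path, used, pos, acc =>
    if (path.length : Int) = K then
      if path.any (fun c => pvDigits.contains c) then acc ++ [String.ofList path] else acc
    else
      (pvCandidates T pos).foldl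
        (fun a ch =>
          if PySem.Set.contains used ch then a
          else pvBtA K T n (path ++ [ch]) (PySem.Set.add used ch) (pos + 1) a)
        acc

def generate_passwords_algorithmic (K : Int) (T : Int) : List String :=
  pvBtA K T 63 [] [] 0 []

-- ===== PORT B =====
-- bound used by the stack loop's termination measure (proved before the port so it can cite it)
theorem pvPushSumLe (n : Nat) (c : Char → Bool) (f : Char → List Char × PySem.Set Char × Int) :
    ∀ (l : List Char) (rest : List (Nat × List Char × PySem.Set Char × Int)),
      (((l.foldl (fun st ch => if c ch then st else (n, f ch) :: st) rest).map
          (fun fr => 63 ^ fr.1)).sum)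
        ≤ l.length * 63 ^ n + ((rest.map (fun fr => 63 ^ fr.1)).sum) := by
  intro l
  induction l with
  | nil => intro rest; simp
  | cons a l ih =>
    intro rest
    have h1 : (((if c a then rest else (n, f a) :: rest).map (fun fr => 63 ^ fr.1)).sum)
        ≤ 63 ^ n + ((rest.map (fun fr => 63 ^ fr.1)).sum) := by
      split <;> simp
    calc (((( a :: l).foldl (fun st ch => if c ch then st else (n, f ch) :: st) rest).map
          (fun fr => 63 ^ fr.1)).sum)
        = (((l.foldl (fun st ch => if c ch then st else (n, f ch) :: st)
              (if c a then rest else (n, f a) :: rest)).map (fun fr => 63 ^ fr.1)).sum) := by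
          simp [List.foldl_cons]
      _ ≤ l.length * 63 ^ n
            + (((if c a then rest else (n, f a) :: rest).map (fun fr => 63 ^ fr.1)).sum) := ih _
      _ ≤ l.length * 63 ^ n + (63 ^ n + ((rest.map (fun fr => 63 ^ fr.1)).sum)) :=
          Nat.add_le_add_left h1 _
      _ = (a :: l).length * 63 ^ n + ((rest.map (fun fr => 63 ^ fr.1)).sum) := by
          simp [List.length_cons]; ring

theorem pvCandidatesRevLen (T pos : Int) : (pvCandidates T pos).reverse.length ≤ 62 := by
  simp only [pvCandidates]; split <;> decide

-- iterative DFS: stack of (fuel, path, used, pos) frames, top = head; the fuel component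
-- (63 at the root, one less per child) only makes the while-loop total, as in port A
def pvLoopB (K T : Int) : List (Nat × List Char × PySem.Set Char × Int) → List String → List String
  | [], res => res
  | (0, _, _, _) :: rest, res => pvLoopB K T rest res
  | (n + 1, path, used, pos) :: rest, res =>
    if (path.length : Int) = K then
      pvLoopB K T rest
        (if path.any (fun c => pvDigits.contains c) then res ++ [String.ofList path] else res)
    else
      pvLoopB K T
        ((pvCandidates T pos).reverse.foldl
          (fun st ch =>
            if PySem.Set.contains used ch then st
            else (n, path ++ [ch], PySem.Set.add used ch, pos + 1) :: st)
          rest)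
        res
termination_by st _ => (st.map (fun fr => 63 ^ fr.1)).sum
decreasing_by
  · simp
  · simp only [List.map_cons, List.sum_cons]
    have : 0 < 63 ^ (n + 1) := by positivity
    omega
  · have hb := pvPushSumLe n (fun ch => PySem.Set.contains used ch)
      (fun ch => (path ++ [ch], PySem.Set.add used ch, pos + 1))
      (pvCandidates T pos).reverse rest
    have hlen := pvCandidatesRevLen T pos
    have hpow : 0 < 63 ^ n := by positivity
    have h62 : (pvCandidates T pos).reverse.length * 63 ^ n ≤ 62 * 63 ^ n :=
      Nat.mul_le_mul_right _ hlen
    have hlt : 62 * 63 ^ n < 63 ^ (n + 1) := by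
      have : 63 ^ (n + 1) = 63 * 63 ^ n := by ring
      rw [this]; exact Nat.mul_lt_mul_of_lt_of_le (by norm_num) (Nat.le_refl _) hpow
    simp only [List.map_cons, List.sum_cons]
    simp only [dite_eq_ite] at *
    omega

def generate_passwords_algorithmic_alt (K : Int) (T : Int) : List String :=
  pvLoopB K T [(63, [], [], 0)] []

-- ===== PRECONDITION & SPEC =====
def Spec_generate_passwords_algorithmic (K : Int) (T : Int) (out : List String) : Prop := out = generate_passwords_algorithmic_alt K T
instance (K : Int) (T : Int) (out : List String) : Decidable (Spec_generate_passwords_algorithmic K T out) := by unfold Spec_generate_passwords_algorithmic; infer_instance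

-- ===== CLAIM (what is proved, stated in full; the proofs are below) =====
def Claim_equal_generate_passwords_algorithmic : Prop := ∀ (K : Int) (T : Int), Dom_generate_passwords_algorithmic K T → Spec_generate_passwords_algorithmic K T (generate_passwords_algorithmic K T)

-- ===== LEMMAS AND PROOFS =====

theorem pvLoopB_nil (K T : Int) (res : List String) : pvLoopB K T [] res = res := by
  simp [pvLoopB]

-- pushing one level of children and running the stack = folding the recursive calls
theorem pvPushRun (K T : Int) (n : Nat) (path : List Char) (used : PySem.Set Char) (pos : Int)
    (ih : ∀ (path : List Char) (used : PySem.Set Char) (pos : Int) rest res,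
      pvLoopB K T ((n, path, used, pos) :: rest) res = pvLoopB K T rest (pvBtA K T n path used pos res)) :
    ∀ (l : List Char) (rest : List (Nat × List Char × PySem.Set Char × Int)) (res : List String),
      pvLoopB K T
        (l.reverse.foldl
          (fun st ch =>
            if PySem.Set.contains used ch then st
            else (n, path ++ [ch], PySem.Set.add used ch, pos + 1) :: st)
          rest) res
      = pvLoopB K T rest
          (l.foldl
            (fun a ch =>
              if PySem.Set.contains used ch then a
              else pvBtA K T n (path ++ [ch]) (PySem.Set.add used ch) (pos + 1) a)
            res) := by
  intro l
  induction l with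
  | nil => intro rest res; simp
  | cons a l ihl =>
    intro rest res
    rw [List.reverse_cons, List.foldl_append]
    simp only [List.foldl_cons, List.foldl_nil]
    by_cases h : PySem.Set.contains used a = true
    · simp only [if_pos h]
      exact ihl rest res
    · simp only [if_neg h]
      rw [ih]
      exact ihl rest _

theorem pvFrameRun (K T : Int) :
    ∀ (n : Nat) (path : List Char) (used : PySem.Set Char) (pos : Int)
      (rest : List (Nat × List Char × PySem.Set Char × Int)) (res : List String),
      pvLoopB K T ((n, path, used, pos) :: rest) res = pvLoopB K T rest (pvBtA K T n path used pos res) := by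
  intro n
  induction n with
  | zero => intro path used pos rest res; simp [pvLoopB, pvBtA]
  | succ n ih =>
    intro path used pos rest res
    by_cases h : (path.length : Int) = K
    · simp only [pvLoopB, pvBtA, if_pos h]
    · simp only [pvLoopB, pvBtA, if_neg h]
      exact pvPushRun K T n path used pos ih (pvCandidates T pos) rest res

-- ===== VERDICT (by name: the statement is the Claim_ definition above) =====
theorem generate_passwords_algorithmic_spec : Claim_equal_generate_passwords_algorithmic := by
  intro K T _
  unfold Spec_generate_passwords_algorithmic generate_passwords_algorithmic generate_passwords_algorithmic_alt
  rw [pvFrameRun, pvLoopB_nil]
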